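-- pv_equiv track=rewrite | github.com/ShukuraliProgrammer/leetcode | algorithms/perfect_pairs.py | perfectPairs
-- ===== SOURCE A (Python) =====
-- from typing import List
--
-- def perfectPairs(nums: List[int]) -> int:
--     res = []
--     for i in range(len(nums) - 1):
--         for j in range(i + 1, len(nums)):
--             a = nums[i]
--             b = nums[j]
--             if min(abs(a - b), abs(a + b)) <= min(abs(a), abs(b)) and max(abs(a - b), abs(a + b)) >= max(abs(a), abs(b)):
--                 res.append([i, j])
--
--     return len(res)
-- ===== SOURCE B (Python) =====
-- from typing import List
--
-- def perfectPairs(nums: List[int]) -> int: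
--     # The pair condition simplifies to max(|a|,|b|) <= 2*min(|a|,|b|):
--     # sort absolute values and count with a sliding left pointer.
--     s = sorted(abs(x) for x in nums)
--     res = 0
--     left = 0
--     for right in range(len(s)):
--         while s[right] > 2 * s[left]:
--             left += 1
--         res += right - left
--     return res
-- ===== Notes on version B (the rewrite author's own statement) =====
-- stated objective: faster
-- what changed: The pair condition simplifies to max(|a|,|b|) <= 2*min(|a|,|b|); B sorts the absolute values once and counts pairs with a sliding left pointer instead of A's nested index scan building a list of pairs.
import Mathlib
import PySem

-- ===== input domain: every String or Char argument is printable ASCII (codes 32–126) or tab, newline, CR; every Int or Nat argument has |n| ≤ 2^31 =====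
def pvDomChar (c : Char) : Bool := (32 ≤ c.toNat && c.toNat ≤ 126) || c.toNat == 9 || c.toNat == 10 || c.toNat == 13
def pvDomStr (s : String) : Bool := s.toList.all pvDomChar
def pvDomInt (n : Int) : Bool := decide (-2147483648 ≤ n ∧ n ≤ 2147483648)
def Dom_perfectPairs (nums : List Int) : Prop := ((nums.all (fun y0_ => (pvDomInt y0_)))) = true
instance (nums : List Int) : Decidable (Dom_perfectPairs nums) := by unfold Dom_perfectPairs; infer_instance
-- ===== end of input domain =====

-- B sorts the absolute values once and counts pairs with a sliding left pointer (the pair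
-- condition simplifies to max(|a|,|b|) <= 2*min(|a|,|b|)), replacing A's nested index scan.


-- ===== PORT A =====
def perfectPairs (nums : List Int) : Int :=
  let res : List (List Int) :=
    (PySem.List.pyRange 0 ((nums.length : Int) - 1) 1).foldl (fun res i =>
      (PySem.List.pyRange (i + 1) (nums.length : Int) 1).foldl (fun res j =>
        let a := PySem.List.pyGetD nums i 0
        let b := PySem.List.pyGetD nums j 0
        if min |a - b| |a + b| ≤ min |a| |b| ∧ max |a - b| |a + b| ≥ max |a| |b| then
          res ++ [[i, j]]
        else res) res) []
  (res.length : Int)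

-- ===== PORT B =====
-- the 'while s[right] > 2*s[left]: left += 1' loop; fuel s.length suffices because on every
-- reachable state left stops at right at latest (s is sorted and nonnegative), so the pyGetD
-- index is always in range and the port is exact there.
def pvAdvance (s : List Int) (v : Int) : Nat → Nat → Nat
  | 0, left => left
  | fuel + 1, left =>
    if v > 2 * PySem.List.pyGetD s (left : Int) 0 then pvAdvance s v fuel (left + 1) else left

def perfectPairs_alt (nums : List Int) : Int :=
  let s := PySem.List.sorted (nums.map (fun x => |x|)) (fun x => x) false
  let st := (PySem.List.pyRange 0 (s.length : Int) 1).foldl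
    (fun (st : Int × Nat) right =>
      let left := pvAdvance s (PySem.List.pyGetD s right 0) s.length st.2
      (st.1 + right - (left : Int), left)) ((0 : Int), (0 : Nat))
  st.1

-- ===== PRECONDITION & SPEC =====
def Spec_perfectPairs (nums : List Int) (out : Int) : Prop := out = perfectPairs_alt nums
instance (nums : List Int) (out : Int) : Decidable (Spec_perfectPairs nums out) := by unfold Spec_perfectPairs; infer_instance

-- ===== CLAIM (what is proved, stated in full; the proofs are below) =====
def Claim_equal_perfectPairs : Prop := ∀ (nums : List Int), Dom_perfectPairs nums → Spec_perfectPairs nums (perfectPairs nums)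

-- ===== LEMMAS AND PROOFS =====

-- A's pair predicate and its absolute-value forms
def pA (a b : Int) : Bool := decide (min |a - b| |a + b| ≤ min |a| |b| ∧ max |a - b| |a + b| ≥ max |a| |b|)
def qB (x y : Int) : Bool := decide (y ≤ 2 * x ∧ x ≤ 2 * y)
def qS (x y : Int) : Bool := decide (y ≤ 2 * x)

-- pair count, grouping by the first (earlier) element
def pc (q : Int → Int → Bool) : List Int → Nat
  | [] => 0
  | x :: xs => xs.countP (q x) + pc q xs

lemma pA_eq_qB (a b : Int) : pA a b = qB |a| |b| := by
  simp only [pA, qB, decide_eq_decide, ge_iff_le]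
  simp only [Int.abs_eq_natAbs]
  omega

lemma pc_map_abs (l : List Int) : pc pA l = pc qB (l.map (fun x => |x|)) := by
  induction l with
  | nil => rfl
  | cons x xs ih =>
    simp only [pc, List.map_cons, List.countP_map, ih]
    congr 1
    exact List.countP_congr (fun a _ => by simp [Function.comp, pA_eq_qB x a])

lemma pc_perm {q : Int → Int → Bool} (hq : ∀ a b, q a b = q b a) :
    ∀ {l l' : List Int}, l.Perm l' → pc q l = pc q l' := by
  intro l l' h
  induction h with
  | nil => rfl
  | cons x h ih => simp only [pc, ih, h.countP_eq]
  | swap x y l =>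
    simp only [pc, List.countP_cons, hq x y]
    omega
  | trans h1 h2 ih1 ih2 => omega

lemma pc_sorted_simp {s : List Int} (hp : s.Pairwise (· ≤ ·)) (h0 : ∀ x ∈ s, 0 ≤ x) :
    pc qB s = pc qS s := by
  induction s with
  | nil => rfl
  | cons x t ih =>
    rw [List.pairwise_cons] at hp
    simp only [List.mem_cons] at h0
    simp only [pc, ih hp.2 (fun y hy => h0 y (Or.inr hy))]
    congr 1
    refine List.countP_congr (fun y hy => ?_)
    have hxy := hp.1 y hy
    have hy0 := h0 y (Or.inr hy)
    simp only [qB, qS, decide_eq_true_eq]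
    omega

-- index sum form of pc, grouping by the first element
lemma sum_pc (p : Int → Int → Bool) : ∀ (l : List Int),
    ((List.range l.length).map (fun k => (l.drop (k + 1)).countP (p (l.getD k 0)))).sum
      = pc p l := by
  intro l
  induction l with
  | nil => rfl
  | cons x xs ih =>
    rw [List.length_cons, List.range_succ_eq_map, List.map_cons, List.sum_cons, List.map_map]
    simp only [Function.comp_def, Nat.succ_eq_add_one, List.drop_succ_cons, List.getD_cons_succ,
      List.getD_cons_zero, List.drop_zero]
    rw [ih]
    rfl

-- A's double loop computes pc pA
lemma perfectPairs_eq_pc (nums : List Int) : perfectPairs nums = (pc pA nums : Int) := by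
  unfold perfectPairs
  rcases Nat.eq_zero_or_pos nums.length with h0 | hpos
  · have hnil : nums = [] := List.length_eq_zero_iff.mp h0
    subst hnil
    rw [PySem.List.pyRange_one_eq_nil (by norm_num)]
    rfl
  · have hfun : ∀ (i res : _) (j : Int),
        (fun (res : List (List Int)) (j : Int) =>
          let a := PySem.List.pyGetD nums i 0
          let b := PySem.List.pyGetD nums j 0
          if min |a - b| |a + b| ≤ min |a| |b| ∧ max |a - b| |a + b| ≥ max |a| |b| then
            res ++ [[i, j]]
          else res) res j
        = (fun (res : List (List Int)) (j : Int) =>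
            if pA (PySem.List.pyGetD nums i 0) (PySem.List.pyGetD nums j 0) = true then
              res ++ [[i, j]]
            else res) res j := by
      intro i res j
      simp only [pA, decide_eq_true_eq]
    simp only [hfun]
    simp only [PySem.List.foldl_append_if
      (fun j => pA (PySem.List.pyGetD nums _ 0) (PySem.List.pyGetD nums j 0))
      (fun j => [_, j])]
    rw [PySem.List.foldl_append_eq_flatMap]
    rw [List.nil_append, List.length_flatMap]
    have hlen : ∀ i : Int, 0 ≤ i →
        ((List.filter (fun j => pA (PySem.List.pyGetD nums i 0) (PySem.List.pyGetD nums j 0))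
          (PySem.List.pyRange (i + 1) (nums.length : Int))).map (fun j => [i, j])).length
        = (nums.drop (i + 1).toNat).countP (pA (PySem.List.pyGetD nums i 0)) := by
      intro i hi
      rw [List.length_map, ← List.countP_eq_length_filter,
        ← PySem.List.map_pyGetD_pyRange' nums 0 (by omega : (0:Int) ≤ i + 1),
        List.countP_map]
      rfl
    rw [show ((nums.length : Int) - 1) = ((nums.length - 1 : Nat) : Int) by omega,
      PySem.List.pyRange_zero_nat, List.map_map]
    refine congrArg (Nat.cast : Nat → Int) ?_
    rw [← sum_pc pA nums]
    have hsplit : (List.range nums.length).map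
        (fun k => (nums.drop (k + 1)).countP (pA (nums.getD k 0)))
        = (List.range (nums.length - 1)).map
            (fun k => (nums.drop (k + 1)).countP (pA (nums.getD k 0)))
          ++ [(nums.drop ((nums.length - 1) + 1)).countP (pA (nums.getD (nums.length - 1) 0))] := by
      conv_lhs => rw [show nums.length = (nums.length - 1) + 1 by omega, List.range_succ]
      rw [List.map_append]
      rfl
    rw [hsplit, List.sum_append]
    have hz : (nums.drop ((nums.length - 1) + 1)).countP (pA (nums.getD (nums.length - 1) 0)) = 0 := by
      rw [show (nums.length - 1) + 1 = nums.length by omega, List.drop_length]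
      rfl
    simp only [List.sum_cons, List.sum_nil, hz, Nat.add_zero]
    refine congrArg List.sum (List.map_congr_left (fun k hk => ?_))
    rw [List.mem_range] at hk
    simp only [Function.comp_apply]
    rw [hlen (k : Int) (Int.natCast_nonneg k)]
    simp only [PySem.List.pyGetD_natCast]
    norm_num


-- group-by-second form of the pair count
lemma pc_append_singleton (q : Int → Int → Bool) (l : List Int) (y : Int) :
    pc q (l ++ [y]) = pc q l + l.countP (fun x => q x y) := by
  induction l with
  | nil => simp [pc]
  | cons x l ih =>
    simp only [List.cons_append, pc, ih, List.countP_append, List.countP_cons,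
      List.countP_nil]
    omega

lemma pc_by_second (q : Int → Int → Bool) (l : List Int) :
    ((List.range l.length).map (fun r => (l.take r).countP (fun x => q x (l.getD r 0)))).sum
      = pc q l := by
  induction l using List.reverseRecOn with
  | nil => rfl
  | append_singleton l y ih =>
    rw [List.length_append, List.length_singleton, List.range_succ, List.map_append,
      List.sum_append, pc_append_singleton]
    congr 1
    · rw [← ih]
      refine congrArg _ (List.map_congr_left (fun r hr => ?_))
      rw [List.mem_range] at hr
      rw [List.take_append_of_le_length (by omega), List.getD_append l [y] 0 r hr]
    · simp only [List.map_cons, List.map_nil, List.sum_cons, List.sum_nil, Nat.add_zero]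
      rw [List.take_append_of_le_length (le_refl l.length), List.take_length,
        List.getD_append_right l [y] 0 l.length (le_refl _)]
      simp

-- advance lemma
lemma pvAdvance_spec {s : List Int} (h0 : ∀ x ∈ s, 0 ≤ x)
    {r : Nat} (hr : r < s.length) :
    ∀ fuel left, left ≤ r → r - left < fuel →
      (∀ i < left, 2 * s.getD i 0 < s.getD r 0) →
      left ≤ pvAdvance s (s.getD r 0) fuel left ∧
      pvAdvance s (s.getD r 0) fuel left ≤ r ∧
      (∀ i < pvAdvance s (s.getD r 0) fuel left, 2 * s.getD i 0 < s.getD r 0) ∧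
      s.getD r 0 ≤ 2 * s.getD (pvAdvance s (s.getD r 0) fuel left) 0 := by
  have hr0 : 0 ≤ s.getD r 0 := by
    rw [List.getD_eq_getElem s 0 hr]
    exact h0 _ (List.getElem_mem hr)
  intro fuel
  induction fuel with
  | zero => intro left _ hfuel _; omega
  | succ fuel ih =>
    intro left hlr hfuel hinv
    rw [pvAdvance]
    simp only [PySem.List.pyGetD_natCast]
    by_cases hc : s.getD r 0 > 2 * s.getD left 0
    · have hltr : left < r := by
        by_contra h
        have heq : left = r := by omega
        rw [heq] at hc
        omega
      rw [if_pos hc]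
      have := ih (left + 1) (by omega) (by omega)
        (fun i hi => by
          rcases Nat.lt_or_ge i left with h' | h'
          · exact hinv i h'
          · have : i = left := by omega
            rw [this]; exact hc)
      exact ⟨by omega, this.2.1, this.2.2.1, this.2.2.2⟩
    · rw [if_neg hc]
      exact ⟨le_refl _, hlr, hinv, by omega⟩

lemma countP_take_split (p : Int → Bool) (l : List Int) (L r : Nat) (hL : L ≤ r)
    (hr : r ≤ l.length) (hfail : ∀ i < L, p (l.getD i 0) = false)
    (hsucc : ∀ i, L ≤ i → i < r → p (l.getD i 0) = true) :
    (l.take r).countP p = r - L := by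
  have h1 : (l.take r).countP p = ((l.take r).take L).countP p + (((l.take r).drop L).countP p) := by
    rw [← List.countP_append, List.take_append_drop]
  rw [h1, List.take_take, Nat.min_eq_left hL]
  have h2 : (l.take L).countP p = 0 := by
    rw [List.countP_eq_zero]
    intro a ha
    rw [List.mem_iff_getElem] at ha
    rcases ha with ⟨i, hi, rfl⟩
    have hiL : i < L := by rw [List.length_take] at hi; omega
    have hil : i < l.length := by rw [List.length_take] at hi; omega
    rw [List.getElem_take, ← List.getD_eq_getElem l 0 hil]
    have hf := hfail i hiL
    simp only [List.getD] at hf ⊢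
    simp [hf]
  rw [h2]
  have h3 : ((l.take r).drop L).countP p = ((l.take r).drop L).length := by
    rw [List.countP_eq_length]
    intro a ha
    rw [List.mem_iff_getElem] at ha
    rcases ha with ⟨i, hi, rfl⟩
    have hlen : (l.take r).length = r := by rw [List.length_take]; omega
    have hir : L + i < r := by rw [List.length_drop, hlen] at hi; omega
    rw [List.getElem_drop, List.getElem_take, ← List.getD_eq_getElem l 0 (by omega)]
    exact hsucc (L + i) (by omega) hir
  rw [h3, List.length_drop, List.length_take]
  omega

lemma getD_mono {s : List Int} (hp : s.Pairwise (· ≤ ·)) {i j : Nat} (hij : i ≤ j)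
    (hj : j < s.length) : s.getD i 0 ≤ s.getD j 0 := by
  rcases Nat.eq_or_lt_of_le hij with rfl | h
  · exact le_refl _
  · rw [List.getD_eq_getElem s 0 (by omega), List.getD_eq_getElem s 0 hj]
    exact (List.pairwise_iff_getElem.mp hp) i j (by omega) hj h

lemma tp_loop {s : List Int} (hp : s.Pairwise (· ≤ ·)) (h0 : ∀ x ∈ s, 0 ≤ x) :
    ∀ (m r left : Nat) (res : Int), r + m = s.length → left ≤ r →
    (m ≠ 0 → ∀ i < left, 2 * s.getD i 0 < s.getD r 0) →
    ((List.range' r m).foldl (fun (st : Int × Nat) (k : Nat) =>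
        (st.1 + (k : Int) - (pvAdvance s (s.getD k 0) s.length st.2 : Int),
         pvAdvance s (s.getD k 0) s.length st.2)) (res, left)).1
      = res + (((List.range' r m).map
          (fun k => (s.take k).countP (fun x => qS x (s.getD k 0)))).sum : Nat) := by
  intro m
  induction m with
  | zero => intro r left res _ _ _; simp
  | succ m ih =>
    intro r left res hrm hlr hinv
    have hr : r < s.length := by omega
    rw [List.range'_succ, List.foldl_cons, List.map_cons, List.sum_cons]
    have adv := pvAdvance_spec h0 hr s.length left hlr (by omega) (hinv (Nat.succ_ne_zero m))
    set L := pvAdvance s (s.getD r 0) s.length left with hL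
    have hcount : (s.take r).countP (fun x => qS x (s.getD r 0)) = r - L := by
      refine countP_take_split _ s L r adv.2.1 (le_of_lt hr) (fun i hi => ?_) (fun i hLi hir => ?_)
      · have := adv.2.2.1 i hi
        simp only [qS, decide_eq_false_iff_not]
        omega
      · have h1 : s.getD L 0 ≤ s.getD i 0 := getD_mono hp hLi (by omega)
        have h2 := adv.2.2.2
        simp only [qS, decide_eq_true_eq]
        omega
    rw [ih (r + 1) L (res + (r : Int) - (L : Int)) (by omega) (by omega)
      (fun hm i hi => lt_of_lt_of_le (adv.2.2.1 i hi) (getD_mono hp (by omega) (by omega)))]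
    rw [hcount]
    have : L ≤ r := adv.2.1
    push_cast [Nat.cast_sub this]
    ring

-- the two-pointer fold computes the group-by-second sum
lemma alt_eq_pc (nums : List Int) : perfectPairs_alt nums
    = (pc qS (PySem.List.sorted (nums.map (fun x => |x|)) (fun x => x) false) : Int) := by
  unfold perfectPairs_alt
  dsimp only
  set s := PySem.List.sorted (nums.map (fun x => |x|)) (fun x => x) false with hs
  have hp : s.Pairwise (· ≤ ·) := PySem.List.sorted_pairwise (nums.map (fun x => |x|)) (fun x => x)
  have h0 : ∀ x ∈ s, 0 ≤ x := by
    intro x hx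
    rcases List.mem_map.1 ((PySem.List.mem_sorted _ _ _ _).1 hx) with ⟨y, _, rfl⟩
    exact abs_nonneg y
  rw [PySem.List.pyRange_zero_nat, List.foldl_map]
  simp only [PySem.List.pyGetD_natCast]
  rw [List.range_eq_range']
  rw [tp_loop hp h0 s.length 0 0 0 (by omega) (le_refl 0) (fun _ i hi => absurd hi (by omega))]
  rw [← List.range_eq_range', pc_by_second qS s]
  ring

-- ===== VERDICT (by name: the statement is the Claim_ definition above) =====
theorem perfectPairs_spec : Claim_equal_perfectPairs := by
  intro nums _
  unfold Spec_perfectPairs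
  rw [perfectPairs_eq_pc, alt_eq_pc, pc_map_abs,
    pc_perm (fun a b => by simp only [qB, decide_eq_decide]; exact and_comm) (PySem.List.sorted_perm (nums.map (fun x => |x|)) (fun x => x) false).symm,
    pc_sorted_simp (PySem.List.sorted_pairwise (nums.map (fun x => |x|)) (fun x => x))
      (fun x hx => by
        rcases (PySem.List.mem_sorted _ _ _ _).1 hx with h
        rcases List.mem_map.1 h with ⟨y, _, rfl⟩
        exact abs_nonneg y)]
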